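-- pv_equiv track=rewrite | github.com/pktangyue/LeetCode | python/1535_FindTheWinnerOfAnArrayGame.py | getWinner
-- ===== SOURCE A (Python) =====
-- from typing import List
--
-- def getWinner(arr: List[int], k: int) -> int:
--     win_count = 0
--     # 保证位置 0 为当前值，win_count 记录位置0的元素获胜了几次
--     # 如果最后只剩下一个元素，则这个元素即数组中的最大值，无论k为多少，肯定是这个值获胜
--     while len(arr) > 1:
--         if arr[0] < arr[1]:
--             win_count = 0
--             arr.pop(0)
--         else:
--             arr.pop(1)
--         win_count += 1
--         if win_count >= k:
--             break
--
--     return arr[0]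
-- ===== SOURCE B (Python) =====
-- def getWinner(arr, k):
--     champ = arr[0]
--     wins = 0
--     for x in arr[1:]:
--         if x > champ:
--             champ, wins = x, 1
--         else:
--             wins += 1
--         if wins >= k:
--             return champ
--     return champ
-- ===== Notes on version B (the rewrite author's own statement) =====
-- stated objective: faster
-- what changed: Replaced the destructive loop that repeatedly pops the loser from the front of the list (each pop(0) is O(n)) with a single non-mutating pass tracking the current champion and its consecutive-win count, returning early once k wins are reached.
import Mathlib
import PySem

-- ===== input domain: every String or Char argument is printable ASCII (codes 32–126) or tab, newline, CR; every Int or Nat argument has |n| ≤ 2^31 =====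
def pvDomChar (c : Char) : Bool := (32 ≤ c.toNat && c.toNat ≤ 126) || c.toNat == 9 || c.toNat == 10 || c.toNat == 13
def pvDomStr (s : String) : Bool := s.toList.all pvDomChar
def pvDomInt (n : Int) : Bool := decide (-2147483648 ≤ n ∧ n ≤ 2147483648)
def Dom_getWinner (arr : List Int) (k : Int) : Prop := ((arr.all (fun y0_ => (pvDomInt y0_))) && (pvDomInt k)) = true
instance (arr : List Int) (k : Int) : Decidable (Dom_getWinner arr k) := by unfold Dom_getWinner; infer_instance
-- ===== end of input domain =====

-- B replaces A's destructive pop(0)/pop(1) loop with one non-mutating pass tracking champion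
-- and consecutive wins (faster). A mutates its list argument in place; equivalence here is
-- about the return value only. Pre_ excludes the empty list, on which A raises IndexError.


-- ===== PORT A =====
-- while len(arr) > 1: compare arr[0], arr[1]; pop the loser; count wins; break at k
def getWinnerLoopA (k : Int) : List Int → Int → List Int
  | a :: b :: rest, win_count =>
    if a < b then
      -- win_count = 0; arr.pop(0); win_count += 1
      let wc := (0 : Int) + 1
      if wc ≥ k then b :: rest else getWinnerLoopA k (b :: rest) wc
    else
      -- arr.pop(1); win_count += 1
      let wc := win_count + 1
      if wc ≥ k then a :: rest else getWinnerLoopA k (a :: rest) wc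
  | arr, _ => arr

-- final `arr[0]`; Pre_ excludes the empty list, where Python raises IndexError
def getWinner (arr : List Int) (k : Int) : Int :=
  (getWinnerLoopA k arr 0).headD 0

-- ===== PORT B =====
def getWinnerLoopB (k : Int) : List Int → Int → Int → Int
  | [], champ, _ => champ
  | x :: rest, champ, wins =>
    let (champ', wins') := if x > champ then (x, (1 : Int)) else (champ, wins + 1)
    if wins' ≥ k then champ' else getWinnerLoopB k rest champ' wins'

def getWinner_alt (arr : List Int) (k : Int) : Int :=
  match arr with
  | [] => 0   -- unreachable under Pre_ (Python B raises IndexError on [])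
  | champ :: rest => getWinnerLoopB k rest champ 0

-- ===== PRECONDITION & SPEC =====
-- Pre_ excludes only the empty list, on which both Pythons raise IndexError (arr[0]).
def Pre_getWinner (arr : List Int) (k : Int) : Prop := arr ≠ []
instance (arr : List Int) (k : Int) : Decidable (Pre_getWinner arr k) := by unfold Pre_getWinner; infer_instance
def pvWitness_getWinner : List Int × Int := ([3, 1, 2], 2)

def Spec_getWinner (arr : List Int) (k : Int) (out : Int) : Prop := out = getWinner_alt arr k
instance (arr : List Int) (k : Int) (out : Int) : Decidable (Spec_getWinner arr k out) := by unfold Spec_getWinner; infer_instance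

-- ===== CLAIM (what is proved, stated in full; the proofs are below) =====
def Claim_equal_getWinner : Prop := ∀ (arr : List Int) (k : Int), Dom_getWinner arr k → Pre_getWinner arr k → Spec_getWinner arr k (getWinner arr k)

-- ===== LEMMAS AND PROOFS =====
lemma loopA_head_eq_loopB (k : Int) (xs : List Int) :
    ∀ champ wc : Int, (getWinnerLoopA k (champ :: xs) wc).headD 0 = getWinnerLoopB k xs champ wc := by
  induction xs with
  | nil => intro champ wc; simp [getWinnerLoopA, getWinnerLoopB]
  | cons x rest ih =>
    intro champ wc
    simp only [getWinnerLoopA, getWinnerLoopB, zero_add, gt_iff_lt]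
    by_cases h : champ < x
    · simp only [if_pos h]
      by_cases hk : (1 : Int) ≥ k
      · simp [hk]
      · simp only [if_neg hk]; exact ih x 1
    · simp only [if_neg h]
      by_cases hk : wc + 1 ≥ k
      · simp [hk]
      · simp only [if_neg hk]; exact ih champ (wc + 1)

-- ===== VERDICT (by name: the statement is the Claim_ definition above) =====
theorem getWinner_spec : Claim_equal_getWinner := by
  intro arr k _ hpre
  match arr with
  | [] => exact absurd rfl hpre
  | champ :: xs =>
    unfold Spec_getWinner getWinner getWinner_alt
    exact loopA_head_eq_loopB k xs champ 0
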